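-- pv_equiv track=rewrite | github.com/luhuiyang/Python-study | GuaProject/homework3/课3作业2答案.py | sum2
-- ===== SOURCE A (Python) =====
-- def sum2(n):
--     s = 2
--     for i in range(n+1):
--         if i % 2 == 0:
--             s += i
--         else:
--             s -= i
--     return s
-- ===== SOURCE B (Python) =====
-- def sum2(n):
--     if n < 0:
--         return 2
--     return 2 + (n // 2 if n % 2 == 0 else -((n + 1) // 2))
-- ===== Notes on version B (the rewrite author's own statement) =====
-- stated objective: faster
-- what changed: Replaces A's linear loop over the range with a constant-time closed-form expression for the alternating sum.
import Mathlib
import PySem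

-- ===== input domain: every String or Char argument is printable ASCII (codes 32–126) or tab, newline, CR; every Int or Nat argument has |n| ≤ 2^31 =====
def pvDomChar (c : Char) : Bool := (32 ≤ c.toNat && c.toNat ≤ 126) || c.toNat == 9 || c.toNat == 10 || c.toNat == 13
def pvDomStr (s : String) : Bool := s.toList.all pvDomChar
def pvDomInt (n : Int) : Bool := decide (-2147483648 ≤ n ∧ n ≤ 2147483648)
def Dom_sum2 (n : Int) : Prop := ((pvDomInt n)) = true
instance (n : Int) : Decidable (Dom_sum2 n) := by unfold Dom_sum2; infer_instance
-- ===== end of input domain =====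

-- B replaces A's O(n) loop by the closed-form value of the alternating sum 0-1+2-…±n (O(1)).

-- ===== PORT A =====
def sum2 (n : Int) : Int :=
  (PySem.List.pyRange 0 (n + 1) 1).foldl
    (fun s i => if PySem.Int.mod i 2 = 0 then s + i else s - i) 2

-- ===== PORT B =====
def sum2_alt (n : Int) : Int :=
  if n < 0 then 2
  else 2 + (if PySem.Int.mod n 2 = 0 then PySem.Int.floordiv n 2
            else -(PySem.Int.floordiv (n + 1) 2))

-- ===== PRECONDITION & SPEC =====
def Spec_sum2 (n : Int) (out : Int) : Prop := out = sum2_alt n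
instance (n : Int) (out : Int) : Decidable (Spec_sum2 n out) := by unfold Spec_sum2; infer_instance

-- ===== CLAIM (what is proved, stated in full; the proofs are below) =====
def Claim_equal_sum2 : Prop := ∀ (n : Int), Dom_sum2 n → Spec_sum2 n (sum2 n)

-- ===== LEMMAS AND PROOFS =====

theorem sum2_loop_closed (m : Nat) :
    (PySem.List.pyRange 0 ((m : Int) + 1) 1).foldl
      (fun s i => if PySem.Int.mod i 2 = 0 then s + i else s - i) 2
    = 2 + (if (m : Int) % 2 = 0 then (m : Int) / 2 else -(((m : Int) + 1) / 2)) := by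
  induction m with
  | zero =>
    rw [show ((0 : Nat) : Int) + 1 = 0 + 1 by norm_num, PySem.List.pyRange_one_singleton]
    simp [PySem.Int.mod]
  | succ k ih =>
    have h : ((k + 1 : Nat) : Int) + 1 = ((k : Int) + 1) + 1 := by push_cast; ring
    rw [h, PySem.List.pyRange_one_succ_right (show (0:Int) ≤ (k:Int) + 1 by omega),
      List.foldl_append, ih]
    simp only [List.foldl_cons, List.foldl_nil,
      PySem.Int.mod_eq_emod_of_pos (show (0:Int) < 2 by norm_num)]
    push_cast
    split_ifs <;> omega

theorem sum2_spec' (n : Int) : sum2 n = sum2_alt n := by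
  unfold sum2 sum2_alt
  by_cases hn : n < 0
  · rw [PySem.List.pyRange_one_eq_nil (by omega)]
    simp [hn]
  · obtain ⟨m, rfl⟩ := Int.eq_ofNat_of_zero_le (by omega : (0 : Int) ≤ n)
    rw [sum2_loop_closed m]
    rw [PySem.Int.mod_eq_emod_of_pos (by norm_num),
      PySem.Int.floordiv_eq_ediv_of_pos (a := (m : Int)) (by norm_num),
      PySem.Int.floordiv_eq_ediv_of_pos (a := (m : Int) + 1) (by norm_num)]
    simp [hn]

-- ===== VERDICT (by name: the statement is the Claim_ definition above) =====
theorem sum2_spec : Claim_equal_sum2 := by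
  intro n _
  exact sum2_spec' n
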